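-- pv_equiv track=rewrite | github.com/MKSonny/Algorithm | 알고리즘 수업/9장 백트래킹과 분기한정/복습/미로탐색0.py | dfs
-- ===== SOURCE A (Python) =====
-- def isSafe(x, y, maze, mark):
--     if x >= 0 and x < len(maze[0]) and y >=0 and y < len(maze):
--         if maze[y][x] != 0 and mark[y][x] == 0:
--             return True
--     return False
--
-- def dfs(maze, x, y, sol, mark):
--
--     if not isSafe(x, y, maze, mark):
--         return False
--
--     sol[y][x] = 1
--     mark[y][x] = 1
--
--     if maze[y][x] == 2:
--         return True
--
--     if dfs(maze, x + 1, y, sol, mark):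
--         return True
--     if dfs(maze, x - 1, y, sol, mark):
--         return True
--     if dfs(maze, x, y + 1, sol, mark):
--         return True
--     if dfs(maze, x, y - 1, sol, mark):
--         return True
--
--     sol[y][x] = 0
--     return False
-- ===== SOURCE B (Python) =====
-- def dfs(maze, x, y, sol, mark):
--     h = len(maze)
--     w = len(maze[0]) if h else 0
--     stack = [(x, y)]
--     seen = set()
--     while stack:
--         cx, cy = stack.pop()
--         if not (0 <= cx < w and 0 <= cy < h):
--             continue
--         if (cx, cy) in seen or maze[cy][cx] == 0 or mark[cy][cx] != 0:
--             continue
--         if maze[cy][cx] == 2: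
--             return True
--         seen.add((cx, cy))
--         stack.extend(((cx, cy - 1), (cx, cy + 1), (cx - 1, cy), (cx + 1, cy)))
--     return False
-- ===== Notes on version B (the rewrite author's own statement) =====
-- stated objective: alternative
-- what changed: Replaces the recursive backtracking DFS (which marks cells, recurses in four directions and un-sets sol on failure) by an iterative explicit-stack reachability scan with a visited set and no backtracking bookkeeping; equivalence is about the return value only (A mutates sol/mark in place, B does not).
-- outside the precondition, e.g. on dfs([], -1, 0, [], []): A returns False, B returns False; on dfs([[0]], 0, 0, [], []): A returns False, B returns False
import Mathlib
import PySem

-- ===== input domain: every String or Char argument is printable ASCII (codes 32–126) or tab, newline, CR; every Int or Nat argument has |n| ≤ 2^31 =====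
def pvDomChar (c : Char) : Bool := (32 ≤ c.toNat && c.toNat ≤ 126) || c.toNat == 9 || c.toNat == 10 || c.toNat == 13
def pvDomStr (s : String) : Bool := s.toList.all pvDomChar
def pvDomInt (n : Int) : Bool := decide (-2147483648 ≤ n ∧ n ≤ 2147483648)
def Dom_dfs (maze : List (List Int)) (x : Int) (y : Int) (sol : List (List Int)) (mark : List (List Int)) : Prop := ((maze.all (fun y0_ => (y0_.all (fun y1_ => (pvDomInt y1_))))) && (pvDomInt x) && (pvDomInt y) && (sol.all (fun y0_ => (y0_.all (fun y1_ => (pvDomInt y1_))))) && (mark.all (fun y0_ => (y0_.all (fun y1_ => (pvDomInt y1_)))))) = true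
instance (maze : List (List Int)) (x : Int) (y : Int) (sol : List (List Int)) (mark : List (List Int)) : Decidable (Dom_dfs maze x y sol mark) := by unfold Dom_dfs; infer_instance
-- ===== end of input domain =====

-- B replaces the recursive backtracking DFS by an iterative explicit-stack reachability scan with a
-- visited set (objective: alternative). Equivalence is about the RETURN VALUE only: A mutates sol and
-- mark in place, B does not mutate its arguments.

-- ===== PORT A =====
-- g[y][x] for 0 ≤ y < len(g), 0 ≤ x < len(g[y]) (every use is behind such bounds checks under Pre_,
-- so the getD/toNat total form is exact there)
def pvCell (g : List (List Int)) (y x : Int) : Int := (g.getD y.toNat []).getD x.toNat 0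

-- g[y][x] = v, same guarded-in-range situation
def pvSet (g : List (List Int)) (y x : Int) (v : Int) : List (List Int) :=
  g.set y.toNat ((g.getD y.toNat []).set x.toNat v)

def isSafeL (x y : Int) (maze mark : List (List Int)) : Bool :=
  if 0 ≤ x ∧ x < ((maze.getD 0 []).length : Int) ∧ 0 ≤ y ∧ y < (maze.length : Int) then
    if pvCell maze y x ≠ 0 ∧ pvCell mark y x = 0 then true else false
  else false

-- the recursion of A, with the in-place updates threaded as state (bool, sol, mark); the fuel is a
-- totality guard only: each recursive level first marks an unmarked cell, so depth ≤ #cells + 1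
def auxA : Nat → List (List Int) → Int → Int → List (List Int) → List (List Int) →
    Bool × List (List Int) × List (List Int)
  | 0, _, _, _, sol, mark => (false, sol, mark)
  | f+1, maze, x, y, sol, mark =>
    if isSafeL x y maze mark then
      let sol1 := pvSet sol y x 1
      let mark1 := pvSet mark y x 1
      if pvCell maze y x = 2 then (true, sol1, mark1)
      else
        let r1 := auxA f maze (x+1) y sol1 mark1
        if r1.1 then r1 else
        let r2 := auxA f maze (x-1) y r1.2.1 r1.2.2
        if r2.1 then r2 else
        let r3 := auxA f maze x (y+1) r2.2.1 r2.2.2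
        if r3.1 then r3 else
        let r4 := auxA f maze x (y-1) r3.2.1 r3.2.2
        if r4.1 then r4 else
        (false, pvSet r4.2.1 y x 0, r4.2.2)
    else (false, sol, mark)

def dfs (maze : List (List Int)) (x : Int) (y : Int) (sol : List (List Int)) (mark : List (List Int)) : Bool :=
  (auxA (maze.length * (maze.getD 0 []).length + 1) maze x y sol mark).1

-- ===== PORT B =====
-- the while loop of Source B: stack (top = head), visited set; fuel is a totality guard only
-- (each iteration pops one frame, and pushes only when a fresh cell is added to seen)
def runB (maze : List (List Int)) (w h : Int) (mark0 : List (List Int)) :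
    Nat → List (Int × Int) → PySem.Set (Int × Int) → Bool
  | _, [], _ => false
  | 0, _ :: _, _ => false
  | f+1, (cx, cy) :: rest, seen =>
    if ¬ (0 ≤ cx ∧ cx < w ∧ 0 ≤ cy ∧ cy < h) then
      runB maze w h mark0 f rest seen
    else if PySem.Set.contains seen (cx, cy) = true ∨ pvCell maze cy cx = 0 ∨ pvCell mark0 cy cx ≠ 0 then
      runB maze w h mark0 f rest seen
    else if pvCell maze cy cx = 2 then true
    else
      runB maze w h mark0 f ((cx+1,cy)::(cx-1,cy)::(cx,cy+1)::(cx,cy-1)::rest)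
        (PySem.Set.add seen (cx, cy))

def dfs_alt (maze : List (List Int)) (x : Int) (y : Int) (sol : List (List Int)) (mark : List (List Int)) : Bool :=
  let h := maze.length
  let w := if h ≠ 0 then (maze.getD 0 []).length else 0
  runB maze (w : Int) (h : Int) mark (4 * h * w + 2) [(x, y)] PySem.Set.empty

-- ===== PRECONDITION & SPEC =====
-- Pre_ restricts to the natural domain: a nonempty maze whose rows, and whose sol/mark grids,
-- cover the len(maze) x len(maze[0]) rectangle the algorithm indexes. Outside it A raises
-- IndexError on essentially every input (empty maze with x ≥ 0, rows or grids too short for an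
-- indexed cell); the only excluded inputs on which A still returns are degenerate ones where every
-- probed cell fails the bounds check before any indexing (see the cites in the claim).
def Pre_dfs (maze : List (List Int)) (x : Int) (y : Int) (sol : List (List Int)) (mark : List (List Int)) : Prop :=
  maze ≠ [] ∧ (∀ row ∈ maze, (maze.getD 0 []).length ≤ row.length) ∧
  maze.length ≤ sol.length ∧ (∀ row ∈ sol, (maze.getD 0 []).length ≤ row.length) ∧
  maze.length ≤ mark.length ∧ (∀ row ∈ mark, (maze.getD 0 []).length ≤ row.length)
instance (maze : List (List Int)) (x : Int) (y : Int) (sol : List (List Int)) (mark : List (List Int)) : Decidable (Pre_dfs maze x y sol mark) := by unfold Pre_dfs; infer_instance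

def pvWitness_dfs : List (List Int) × Int × Int × List (List Int) × List (List Int) :=
  ([[1, 2]], 0, 0, [[0, 0]], [[0, 0]])

def Spec_dfs (maze : List (List Int)) (x : Int) (y : Int) (sol : List (List Int)) (mark : List (List Int)) (out : Bool) : Prop := out = dfs_alt maze x y sol mark
instance (maze : List (List Int)) (x : Int) (y : Int) (sol : List (List Int)) (mark : List (List Int)) (out : Bool) : Decidable (Spec_dfs maze x y sol mark out) := by unfold Spec_dfs; infer_instance

-- ===== CLAIM (what is proved, stated in full; the proofs are below) =====
def Claim_equal_dfs : Prop := ∀ (maze : List (List Int)) (x : Int) (y : Int) (sol : List (List Int)) (mark : List (List Int)), Dom_dfs maze x y sol mark → Pre_dfs maze x y sol mark → Spec_dfs maze x y sol mark (dfs maze x y sol mark)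

-- ===== LEMMAS AND PROOFS =====

-- the in-bounds grid positions (x, y)
def pvCells (w h : Nat) : List (Int × Int) :=
  ((List.range w).map fun i : Nat => (i : Int)) ×ˢ ((List.range h).map fun j : Nat => (j : Int))

-- number of in-bounds cells that are unmarked in mark0 and not yet in seen
def pvU (w h : Nat) (mark0 : List (List Int)) (seen : PySem.Set (Int × Int)) : Nat :=
  (pvCells w h).countP fun p => (pvCell mark0 p.2 p.1 == 0) && !(PySem.Set.contains seen p)

-- the simulation invariant: mark is mark0 with exactly the seen cells additionally marked
def pvInv (w h : Nat) (mark0 mark : List (List Int)) (seen : PySem.Set (Int × Int)) : Prop :=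
  mark.length = mark0.length ∧
  (∀ i : Nat, (mark.getD i []).length = (mark0.getD i []).length) ∧
  ∀ x y : Int, 0 ≤ x → x < (w : Int) → 0 ≤ y → y < (h : Int) →
    (pvCell mark y x = 0 ↔ (pvCell mark0 y x = 0 ∧ PySem.Set.contains seen (x, y) = false))

lemma length_pvSet (g : List (List Int)) (y x v : Int) : (pvSet g y x v).length = g.length := by
  simp [pvSet]

lemma rowlen_pvSet (g : List (List Int)) (y x v : Int) (i : Nat) :
    ((pvSet g y x v).getD i []).length = (g.getD i []).length := by
  unfold pvSet
  by_cases h : y.toNat = i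
  · subst h
    by_cases hl : y.toNat < g.length
    · rw [List.getD_eq_getElem?_getD (l := List.set _ _ _), List.getElem?_set_self (by simpa using hl)]
      simp [List.getD_eq_getElem?_getD]
    · rw [List.set_eq_of_length_le (by omega)]
  · rw [List.getD_eq_getElem?_getD (l := List.set _ _ _), List.getElem?_set_ne h,
      ← List.getD_eq_getElem?_getD]

lemma pvCell_pvSet_same (g : List (List Int)) (y x v : Int)
    (hyl : y.toNat < g.length) (hxl : x.toNat < (g.getD y.toNat []).length) :
    pvCell (pvSet g y x v) y x = v := by
  unfold pvCell pvSet
  rw [List.getD_eq_getElem?_getD (l := List.set _ _ _), List.getElem?_set_self (by simpa using hyl)]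
  simp only [Option.getD_some]
  rw [List.getD_eq_getElem?_getD, List.getElem?_set_self (by simpa using hxl)]
  rfl

lemma pvCell_pvSet_ne (g : List (List Int)) (y x y' x' v : Int)
    (h : y'.toNat ≠ y.toNat ∨ x'.toNat ≠ x.toNat) :
    pvCell (pvSet g y x v) y' x' = pvCell g y' x' := by
  unfold pvCell pvSet
  by_cases hy : y.toNat = y'.toNat
  · rw [← hy]
    rcases h with h | h
    · exact absurd hy.symm h
    · by_cases hl : y.toNat < g.length
      · rw [List.getD_eq_getElem?_getD (l := List.set _ _ _), List.getElem?_set_self (by simpa using hl)]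
        simp only [Option.getD_some]
        rw [List.getD_eq_getElem?_getD (l := List.set _ _ _), List.getElem?_set_ne (Ne.symm h),
          ← List.getD_eq_getElem?_getD]
      · rw [List.set_eq_of_length_le (by omega)]
  · rw [List.getD_eq_getElem?_getD (l := List.set _ _ _), List.getElem?_set_ne hy,
      ← List.getD_eq_getElem?_getD]

lemma mem_pvCells (w h : Nat) (x y : Int) :
    (x, y) ∈ pvCells w h ↔ 0 ≤ x ∧ x < (w : Int) ∧ 0 ≤ y ∧ y < (h : Int) := by
  unfold pvCells
  rw [List.mem_product]
  simp only [List.mem_map, List.mem_range]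
  constructor
  · rintro ⟨⟨i, hi, rfl⟩, ⟨j, hj, rfl⟩⟩
    refine ⟨by omega, by exact_mod_cast hi, by omega, by exact_mod_cast hj⟩
  · rintro ⟨hx0, hxw, hy0, hyh⟩
    refine ⟨⟨x.toNat, by omega, by omega⟩, ⟨y.toNat, by omega, by omega⟩⟩

lemma length_pvCells (w h : Nat) : (pvCells w h).length = w * h := by
  unfold pvCells
  rw [List.length_product]
  simp

lemma countP_lt_of {α : Type} (p q : α → Bool) (c : α) :
    ∀ l : List α, (∀ a ∈ l, q a = true → p a = true) → c ∈ l → p c = true → q c = false →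
      l.countP q < l.countP p := by
  intro l
  induction l with
  | nil => intro _ hc; cases hc
  | cons a l ih =>
    intro himp hc hp hq
    rw [List.countP_cons, List.countP_cons]
    rcases List.mem_cons.mp hc with rfl | hc
    · have hle : l.countP q ≤ l.countP p :=
        List.countP_mono_left (fun a ha hqa => himp a (List.mem_cons_of_mem _ ha) hqa)
      rw [if_pos hp, if_neg (by simp [hq])]
      omega
    · have h2 := ih (fun b hb => himp b (List.mem_cons_of_mem _ hb)) hc hp hq
      have hia : q a = true → p a = true := himp a (List.mem_cons_self)
      rcases hqa : q a with _ | _ <;> rcases hpa : p a with _ | _ <;> simp_all <;> omega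

lemma pvU_le (w h : Nat) (mark0 : List (List Int)) (seen : PySem.Set (Int × Int)) :
    pvU w h mark0 seen ≤ w * h := by
  exact le_trans List.countP_le_length (le_of_eq (length_pvCells w h))

lemma contains_add_self {α : Type} [BEq α] [LawfulBEq α] (s : PySem.Set α) (c : α) :
    PySem.Set.contains (PySem.Set.add s c) c = true := by
  simp [PySem.Set.mem_add]

lemma contains_add_mono {α : Type} [BEq α] [LawfulBEq α] (s : PySem.Set α) (c a : α)
    (h : PySem.Set.contains s a = true) : PySem.Set.contains (PySem.Set.add s c) a = true := by
  rw [PySem.Set.contains_iff] at h ⊢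
  rw [PySem.Set.mem_add]; exact Or.inl h

lemma contains_add_ne {α : Type} [BEq α] [LawfulBEq α] (s : PySem.Set α) (c a : α) (h : a ≠ c) :
    PySem.Set.contains (PySem.Set.add s c) a = PySem.Set.contains s a := by
  simp [PySem.Set.mem_add, h]

lemma pvU_add_lt (w h : Nat) (mark0 : List (List Int)) (seen : PySem.Set (Int × Int))
    (cx cy : Int) (hin : 0 ≤ cx ∧ cx < (w : Int) ∧ 0 ≤ cy ∧ cy < (h : Int))
    (hm0 : pvCell mark0 cy cx = 0) (hns : PySem.Set.contains seen (cx, cy) = false) :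
    pvU w h mark0 (PySem.Set.add seen (cx, cy)) < pvU w h mark0 seen := by
  apply countP_lt_of _ _ (cx, cy)
  · intro a _ hq
    simp only [Bool.and_eq_true, Bool.not_eq_true'] at hq ⊢
    refine ⟨hq.1, ?_⟩
    rcases hb : PySem.Set.contains seen a with _ | _
    · rfl
    · have := contains_add_mono seen (cx, cy) a hb
      rw [hq.2] at this; cases this
  · exact (mem_pvCells w h cx cy).mpr hin
  · simp only [Bool.and_eq_true, beq_iff_eq, Bool.not_eq_true']
    exact ⟨hm0, hns⟩
  · simp only [contains_add_self, Bool.not_true, Bool.and_false]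

lemma pvU_mono (w h : Nat) (mark0 : List (List Int)) (seen seen' : PySem.Set (Int × Int))
    (hsub : ∀ p, PySem.Set.contains seen p = true → PySem.Set.contains seen' p = true) :
    pvU w h mark0 seen' ≤ pvU w h mark0 seen := by
  apply List.countP_mono_left
  intro a _ hp
  simp only [Bool.and_eq_true, Bool.not_eq_true'] at hp ⊢
  refine ⟨hp.1, ?_⟩
  rcases hb : PySem.Set.contains seen a with _ | _
  · rfl
  · have hcontr := hsub a hb
    rw [hp.2] at hcontr
    cases hcontr

lemma isSafeL_iff (x y : Int) (maze mark : List (List Int)) :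
    isSafeL x y maze mark = true ↔
      (0 ≤ x ∧ x < ((maze.getD 0 []).length : Int) ∧ 0 ≤ y ∧ y < (maze.length : Int)) ∧
      pvCell maze y x ≠ 0 ∧ pvCell mark y x = 0 := by
  unfold isSafeL; split_ifs with h1 h2 <;> simp_all

lemma runB_nil (maze : List (List Int)) (w h : Int) (mark0 : List (List Int)) (f : Nat)
    (seen : PySem.Set (Int × Int)) : runB maze w h mark0 f [] seen = false := by
  cases f <;> simp [runB]

-- fuel irrelevance: any two sufficient fuels give the same run
lemma runB_stab (maze : List (List Int)) (W H : Nat) (mark0 : List (List Int)) :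
    ∀ f g (stack : List (Int × Int)) (seen : PySem.Set (Int × Int)),
      stack.length + 4 * pvU W H mark0 seen < f →
      stack.length + 4 * pvU W H mark0 seen < g →
      runB maze (W : Int) (H : Int) mark0 f stack seen = runB maze (W : Int) (H : Int) mark0 g stack seen := by
  intro f
  induction f with
  | zero => intro g stack seen hf _; exact absurd hf (by omega)
  | succ f ih =>
    intro g stack seen hf hg
    rcases stack with _ | ⟨⟨cx, cy⟩, rest⟩
    · rw [runB_nil, runB_nil]
    rcases g with _ | g
    · exact absurd hg (by omega)
    simp only [runB]
    by_cases hin : 0 ≤ cx ∧ cx < (W : Int) ∧ 0 ≤ cy ∧ cy < (H : Int)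
    · rw [if_neg (not_not_intro hin), if_neg (not_not_intro hin)]
      by_cases hskip : PySem.Set.contains seen (cx, cy) = true ∨ pvCell maze cy cx = 0 ∨
          pvCell mark0 cy cx ≠ 0
      · rw [if_pos hskip, if_pos hskip]
        exact ih g rest seen (by simp at hf ⊢; omega) (by simp at hg ⊢; omega)
      · rw [if_neg hskip, if_neg hskip]
        by_cases h2c : pvCell maze cy cx = 2
        · rw [if_pos h2c, if_pos h2c]
        · rw [if_neg h2c, if_neg h2c]
          push_neg at hskip
          have hns : PySem.Set.contains seen (cx, cy) = false := by
            rcases hb : PySem.Set.contains seen (cx, cy) with _ | _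
            · rfl
            · exact absurd hb hskip.1
          have hdec := pvU_add_lt W H mark0 seen cx cy ⟨hin.1, hin.2.1, hin.2.2.1, hin.2.2.2⟩
            hskip.2.2 hns
          exact ih g _ _ (by simp at hf ⊢; omega) (by simp at hg ⊢; omega)
    · rw [if_pos hin, if_pos hin]
      exact ih g rest seen (by simp at hf ⊢; omega) (by simp at hg ⊢; omega)

-- the simulation: running A from one cell is one visit of B's loop
lemma sim (maze : List (List Int)) (W H : Nat) (mark0 : List (List Int))
    (hW0 : (maze.getD 0 []).length = W) (hH : maze.length = H)
    (hm0H : H ≤ mark0.length) (hm0W : ∀ row ∈ mark0, W ≤ row.length) :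
    ∀ (fA : Nat) (x y : Int) (sol mark : List (List Int)) (seen : PySem.Set (Int × Int))
      (rest : List (Int × Int)),
      pvInv W H mark0 mark seen → pvU W H mark0 seen < fA →
      ((auxA fA maze x y sol mark).1 = true →
        ∀ fB : Nat, rest.length + 1 + 4 * pvU W H mark0 seen < fB →
          runB maze (W : Int) (H : Int) mark0 fB ((x, y) :: rest) seen = true) ∧
      ((auxA fA maze x y sol mark).1 = false →
        ∃ seen', pvInv W H mark0 (auxA fA maze x y sol mark).2.2 seen' ∧
          (∀ p, PySem.Set.contains seen p = true → PySem.Set.contains seen' p = true) ∧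
          ∀ fB fB' : Nat, rest.length + 1 + 4 * pvU W H mark0 seen < fB →
            rest.length + 4 * pvU W H mark0 seen' < fB' →
            runB maze (W : Int) (H : Int) mark0 fB ((x, y) :: rest) seen =
              runB maze (W : Int) (H : Int) mark0 fB' rest seen') := by
  intro fA
  induction fA with
  | zero => intro x y sol mark seen rest _ hU; exact absurd hU (by omega)
  | succ f ih =>
    intro x y sol mark seen rest hInv hU
    by_cases hsafe0 : isSafeL x y maze mark = true
    · -- safe cell
      have hsafe := (isSafeL_iff x y maze mark).mp hsafe0
      obtain ⟨hinB, hmz, hmk⟩ := hsafe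
      rw [hW0, hH] at hinB
      have hin : 0 ≤ x ∧ x < (W : Int) ∧ 0 ≤ y ∧ y < (H : Int) := hinB
      have hmk0 : pvCell mark0 y x = 0 ∧ PySem.Set.contains seen (x, y) = false :=
        (hInv.2.2 x y hin.1 hin.2.1 hin.2.2.1 hin.2.2.2).mp hmk
      have hnoskip : ¬ (PySem.Set.contains seen (x, y) = true ∨ pvCell maze y x = 0 ∨
          pvCell mark0 y x ≠ 0) := by
        push_neg
        refine ⟨fun hm => ?_, hmz, hmk0.1⟩
        rw [hmk0.2] at hm
        cases hm
      have hmlen : mark.length = mark0.length := hInv.1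
      have hyl : y.toNat < mark.length := by omega
      have hrow0 : W ≤ (mark0.getD y.toNat []).length := by
        rw [List.getD_eq_getElem _ _ (show y.toNat < mark0.length by omega)]
        exact hm0W _ (List.getElem_mem _)
      have hxl : x.toNat < (mark.getD y.toNat []).length := by
        rw [hInv.2.1 y.toNat]; omega
      have hcell1 : pvCell (pvSet mark y x 1) y x = 1 := pvCell_pvSet_same mark y x 1 hyl hxl
      have hInv1 : pvInv W H mark0 (pvSet mark y x 1) (PySem.Set.add seen (x, y)) := by
        refine ⟨(length_pvSet mark y x 1).trans hInv.1, fun i => (rowlen_pvSet mark y x 1 i).trans (hInv.2.1 i), ?_⟩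
        intro x' y' hx0 hxW hy0 hyH
        by_cases hpt : x' = x ∧ y' = y
        · obtain ⟨rfl, rfl⟩ := hpt
          rw [hcell1]
          simp [hmk0.1]
        · have hne : (x', y') ≠ (x, y) := by
            intro hEq
            rw [Prod.mk.injEq] at hEq
            exact hpt hEq
          rw [pvCell_pvSet_ne mark y x y' x' 1 (by omega),
            contains_add_ne seen (x, y) (x', y') hne]
          exact hInv.2.2 x' y' hx0 hxW hy0 hyH
      have hU1 : pvU W H mark0 (PySem.Set.add seen (x, y)) < pvU W H mark0 seen :=
        pvU_add_lt W H mark0 seen x y hin hmk0.1 hmk0.2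
      by_cases h2 : pvCell maze y x = 2
      · -- target found: both return true
        have hA : auxA (f + 1) maze x y sol mark = (true, pvSet sol y x 1, pvSet mark y x 1) := by
          simp only [auxA]
          rw [if_pos hsafe0, if_pos h2]
        constructor
        · intro _ fB hfB
          rcases fB with _ | g
          · exact absurd hfB (by omega)
          simp only [runB]
          rw [if_neg (not_not_intro hin), if_neg hnoskip, if_pos h2]
        · intro hb
          rw [hA] at hb
          cases hb
      · -- explore the four neighbours in order
        have ih1 := ih (x + 1) y (pvSet sol y x 1) (pvSet mark y x 1) (PySem.Set.add seen (x, y))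
          ((x - 1, y) :: (x, y + 1) :: (x, y - 1) :: rest) hInv1 (by omega)
        rcases hb1 : (auxA f maze (x + 1) y (pvSet sol y x 1) (pvSet mark y x 1)).1 with _ | _
        · -- child 1 fails: continue with the remaining neighbours
          obtain ⟨seen2, hInv2, hmono2, heq2⟩ := ih1.2 hb1
          have hUm2 : pvU W H mark0 seen2 ≤ pvU W H mark0 (PySem.Set.add seen (x, y)) :=
            pvU_mono W H mark0 _ seen2 hmono2
          have ih2 := ih (x - 1) y (auxA f maze (x + 1) y (pvSet sol y x 1) (pvSet mark y x 1)).2.1 (auxA f maze (x + 1) y (pvSet sol y x 1) (pvSet mark y x 1)).2.2 seen2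
            ((x, y + 1) :: (x, y - 1) :: rest) hInv2 (by omega)
          rcases hb2 : (auxA f maze (x - 1) y (auxA f maze (x + 1) y (pvSet sol y x 1) (pvSet mark y x 1)).2.1 (auxA f maze (x + 1) y (pvSet sol y x 1) (pvSet mark y x 1)).2.2).1 with _ | _
          · -- child 2 fails
            obtain ⟨seen3, hInv3, hmono3, heq3⟩ := ih2.2 hb2
            have hUm3 : pvU W H mark0 seen3 ≤ pvU W H mark0 seen2 :=
              pvU_mono W H mark0 _ seen3 hmono3
            have ih3 := ih x (y + 1) (auxA f maze (x - 1) y (auxA f maze (x + 1) y (pvSet sol y x 1) (pvSet mark y x 1)).2.1 (auxA f maze (x + 1) y (pvSet sol y x 1) (pvSet mark y x 1)).2.2).2.1 (auxA f maze (x - 1) y (auxA f maze (x + 1) y (pvSet sol y x 1) (pvSet mark y x 1)).2.1 (auxA f maze (x + 1) y (pvSet sol y x 1) (pvSet mark y x 1)).2.2).2.2 seen3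
              ((x, y - 1) :: rest) hInv3 (by omega)
            rcases hb3 : (auxA f maze x (y + 1) (auxA f maze (x - 1) y (auxA f maze (x + 1) y (pvSet sol y x 1) (pvSet mark y x 1)).2.1 (auxA f maze (x + 1) y (pvSet sol y x 1) (pvSet mark y x 1)).2.2).2.1 (auxA f maze (x - 1) y (auxA f maze (x + 1) y (pvSet sol y x 1) (pvSet mark y x 1)).2.1 (auxA f maze (x + 1) y (pvSet sol y x 1) (pvSet mark y x 1)).2.2).2.2).1 with _ | _
            · -- child 3 fails
              obtain ⟨seen4, hInv4, hmono4, heq4⟩ := ih3.2 hb3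
              have hUm4 : pvU W H mark0 seen4 ≤ pvU W H mark0 seen3 :=
                pvU_mono W H mark0 _ seen4 hmono4
              have ih4 := ih x (y - 1) (auxA f maze x (y + 1) (auxA f maze (x - 1) y (auxA f maze (x + 1) y (pvSet sol y x 1) (pvSet mark y x 1)).2.1 (auxA f maze (x + 1) y (pvSet sol y x 1) (pvSet mark y x 1)).2.2).2.1 (auxA f maze (x - 1) y (auxA f maze (x + 1) y (pvSet sol y x 1) (pvSet mark y x 1)).2.1 (auxA f maze (x + 1) y (pvSet sol y x 1) (pvSet mark y x 1)).2.2).2.2).2.1 (auxA f maze x (y + 1) (auxA f maze (x - 1) y (auxA f maze (x + 1) y (pvSet sol y x 1) (pvSet mark y x 1)).2.1 (auxA f maze (x + 1) y (pvSet sol y x 1) (pvSet mark y x 1)).2.2).2.1 (auxA f maze (x - 1) y (auxA f maze (x + 1) y (pvSet sol y x 1) (pvSet mark y x 1)).2.1 (auxA f maze (x + 1) y (pvSet sol y x 1) (pvSet mark y x 1)).2.2).2.2).2.2 seen4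
                rest hInv4 (by omega)
              rcases hb4 : (auxA f maze x (y - 1) (auxA f maze x (y + 1) (auxA f maze (x - 1) y (auxA f maze (x + 1) y (pvSet sol y x 1) (pvSet mark y x 1)).2.1 (auxA f maze (x + 1) y (pvSet sol y x 1) (pvSet mark y x 1)).2.2).2.1 (auxA f maze (x - 1) y (auxA f maze (x + 1) y (pvSet sol y x 1) (pvSet mark y x 1)).2.1 (auxA f maze (x + 1) y (pvSet sol y x 1) (pvSet mark y x 1)).2.2).2.2).2.1 (auxA f maze x (y + 1) (auxA f maze (x - 1) y (auxA f maze (x + 1) y (pvSet sol y x 1) (pvSet mark y x 1)).2.1 (auxA f maze (x + 1) y (pvSet sol y x 1) (pvSet mark y x 1)).2.2).2.1 (auxA f maze (x - 1) y (auxA f maze (x + 1) y (pvSet sol y x 1) (pvSet mark y x 1)).2.1 (auxA f maze (x + 1) y (pvSet sol y x 1) (pvSet mark y x 1)).2.2).2.2).2.2).1 with _ | _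
              · -- all four children fail: A backtracks, B just pops
                obtain ⟨seen5, hInv5, hmono5, heq5⟩ := ih4.2 hb4
                have hUm5 : pvU W H mark0 seen5 ≤ pvU W H mark0 seen4 :=
                  pvU_mono W H mark0 _ seen5 hmono5
                have hA : auxA (f + 1) maze x y sol mark =
                    (false, pvSet (auxA f maze x (y - 1) (auxA f maze x (y + 1) (auxA f maze (x - 1) y (auxA f maze (x + 1) y (pvSet sol y x 1) (pvSet mark y x 1)).2.1 (auxA f maze (x + 1) y (pvSet sol y x 1) (pvSet mark y x 1)).2.2).2.1 (auxA f maze (x - 1) y (auxA f maze (x + 1) y (pvSet sol y x 1) (pvSet mark y x 1)).2.1 (auxA f maze (x + 1) y (pvSet sol y x 1) (pvSet mark y x 1)).2.2).2.2).2.1 (auxA f maze x (y + 1) (auxA f maze (x - 1) y (auxA f maze (x + 1) y (pvSet sol y x 1) (pvSet mark y x 1)).2.1 (auxA f maze (x + 1) y (pvSet sol y x 1) (pvSet mark y x 1)).2.2).2.1 (auxA f maze (x - 1) y (auxA f maze (x + 1) y (pvSet sol y x 1) (pvSet mark y x 1)).2.1 (auxA f maze (x + 1) y (pvSet sol y x 1)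 (pvSet mark y x 1)).2.2).2.2).2.2).2.1 y x 0, (auxA f maze x (y - 1) (auxA f maze x (y + 1) (auxA f maze (x - 1) y (auxA f maze (x + 1) y (pvSet sol y x 1) (pvSet mark y x 1)).2.1 (auxA f maze (x + 1) y (pvSet sol y x 1) (pvSet mark y x 1)).2.2).2.1 (auxA f maze (x - 1) y (auxA f maze (x + 1) y (pvSet sol y x 1) (pvSet mark y x 1)).2.1 (auxA f maze (x + 1) y (pvSet sol y x 1) (pvSet mark y x 1)).2.2).2.2).2.1 (auxA f maze x (y + 1) (auxA f maze (x - 1) y (auxA f maze (x + 1) y (pvSet sol y x 1) (pvSet mark y x 1)).2.1 (auxA f maze (x + 1) y (pvSet sol y x 1) (pvSet mark y x 1)).2.2).2.1 (auxA f maze (x - 1) y (auxA f maze (x + 1) y (pvSet sol y x 1) (pvSet mark y x 1)).2.1 (auxA f maze (x + 1) y (pvSet sol y x 1) (pvSet mark y x 1)).2.2).2.2).2.2).2.2) := by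
                  simp only [auxA]
                  rw [if_pos hsafe0, if_neg h2]
                  simp [hb1, hb2, hb3, hb4]
                constructor
                · intro hb
                  rw [hA] at hb
                  cases hb
                · intro _
                  refine ⟨seen5, by rw [hA]; exact hInv5, ?_, ?_⟩
                  · intro p hp
                    exact hmono5 _ (hmono4 _ (hmono3 _ (hmono2 _
                      (contains_add_mono seen (x, y) p hp))))
                  · intro fB fB' hfB hfB'
                    rcases fB with _ | g
                    · exact absurd hfB (by omega)
                    simp only [runB]
                    rw [if_neg (not_not_intro hin), if_neg hnoskip, if_neg h2]
                    exact (heq2 g (rest.length + 3 + 4 * pvU W H mark0 seen2 + 1)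
                        (by simp only [List.length_cons]; omega)
                        (by simp only [List.length_cons]; omega)).trans
                      ((heq3 _ (rest.length + 2 + 4 * pvU W H mark0 seen3 + 1)
                        (by simp only [List.length_cons]; omega)
                        (by simp only [List.length_cons]; omega)).trans
                      ((heq4 _ (rest.length + 1 + 4 * pvU W H mark0 seen4 + 1)
                        (by simp only [List.length_cons]; omega)
                        (by simp only [List.length_cons]; omega)).trans
                      (heq5 _ fB' (by omega) hfB')))
              · -- child 4 succeeds
                have hA : (auxA (f + 1) maze x y sol mark).1 = true := by
                  simp only [auxA]
                  rw [if_pos hsafe0, if_neg h2]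
                  simp [hb1, hb2, hb3, hb4]
                constructor
                · intro _ fB hfB
                  rcases fB with _ | g
                  · exact absurd hfB (by omega)
                  simp only [runB]
                  rw [if_neg (not_not_intro hin), if_neg hnoskip, if_neg h2]
                  exact (heq2 g (rest.length + 3 + 4 * pvU W H mark0 seen2 + 1)
                      (by simp only [List.length_cons]; omega)
                      (by simp only [List.length_cons]; omega)).trans
                    ((heq3 _ (rest.length + 2 + 4 * pvU W H mark0 seen3 + 1)
                      (by simp only [List.length_cons]; omega)
                      (by simp only [List.length_cons]; omega)).trans
                    ((heq4 _ (rest.length + 1 + 4 * pvU W H mark0 seen4 + 1)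
                      (by simp only [List.length_cons]; omega)
                      (by simp only [List.length_cons]; omega)).trans
                    (ih4.1 hb4 _ (by omega))))
                · intro hb
                  rw [hA] at hb
                  cases hb
            · -- child 3 succeeds
              have hA : (auxA (f + 1) maze x y sol mark).1 = true := by
                simp only [auxA]
                rw [if_pos hsafe0, if_neg h2]
                simp [hb1, hb2, hb3]
              constructor
              · intro _ fB hfB
                rcases fB with _ | g
                · exact absurd hfB (by omega)
                simp only [runB]
                rw [if_neg (not_not_intro hin), if_neg hnoskip, if_neg h2]
                exact (heq2 g (rest.length + 3 + 4 * pvU W H mark0 seen2 + 1)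
                    (by simp only [List.length_cons]; omega)
                    (by simp only [List.length_cons]; omega)).trans
                  ((heq3 _ (rest.length + 2 + 4 * pvU W H mark0 seen3 + 1)
                    (by simp only [List.length_cons]; omega)
                    (by simp only [List.length_cons]; omega)).trans
                  (ih3.1 hb3 _ (by simp only [List.length_cons]; omega)))
              · intro hb
                rw [hA] at hb
                cases hb
          · -- child 2 succeeds
            have hA : (auxA (f + 1) maze x y sol mark).1 = true := by
              simp only [auxA]
              rw [if_pos hsafe0, if_neg h2]
              simp [hb1, hb2]
            constructor
            · intro _ fB hfB
              rcases fB with _ | g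
              · exact absurd hfB (by omega)
              simp only [runB]
              rw [if_neg (not_not_intro hin), if_neg hnoskip, if_neg h2]
              exact (heq2 g (rest.length + 3 + 4 * pvU W H mark0 seen2 + 1)
                  (by simp only [List.length_cons]; omega)
                  (by simp only [List.length_cons]; omega)).trans
                (ih2.1 hb2 _ (by simp only [List.length_cons]; omega))
            · intro hb
              rw [hA] at hb
              cases hb
        · -- child 1 succeeds
          have hA : (auxA (f + 1) maze x y sol mark).1 = true := by
            simp only [auxA]
            rw [if_pos hsafe0, if_neg h2]
            simp [hb1]
          constructor
          · intro _ fB hfB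
            rcases fB with _ | g
            · exact absurd hfB (by omega)
            simp only [runB]
            rw [if_neg (not_not_intro hin), if_neg hnoskip, if_neg h2]
            exact ih1.1 hb1 g (by simp only [List.length_cons]; omega)
          · intro hb
            rw [hA] at hb
            cases hb
    · -- unsafe cell: A returns False without recursing, B pops the frame
      have hA : auxA (f + 1) maze x y sol mark = (false, sol, mark) := by
        simp only [auxA]
        rw [if_neg hsafe0]
      constructor
      · intro hb
        rw [hA] at hb
        cases hb
      · intro _
        refine ⟨seen, by rw [hA]; exact hInv, fun p hp => hp, ?_⟩
        intro fB fB' hfB hfB'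
        rcases fB with _ | g
        · exact absurd hfB (by omega)
        simp only [runB]
        by_cases hin : 0 ≤ x ∧ x < (W : Int) ∧ 0 ≤ y ∧ y < (H : Int)
        · rw [if_neg (not_not_intro hin)]
          have hskip : PySem.Set.contains seen (x, y) = true ∨ pvCell maze y x = 0 ∨
              pvCell mark0 y x ≠ 0 := by
            have hnsafe : ¬ ((0 ≤ x ∧ x < ((maze.getD 0 []).length : Int) ∧ 0 ≤ y ∧
                y < (maze.length : Int)) ∧ pvCell maze y x ≠ 0 ∧ pvCell mark y x = 0) := by
              intro hc
              exact hsafe0 ((isSafeL_iff x y maze mark).mpr hc)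
            rw [hW0, hH] at hnsafe
            by_cases hmz : pvCell maze y x = 0
            · exact Or.inr (Or.inl hmz)
            · have hmk : pvCell mark y x ≠ 0 := by
                intro hmk
                exact hnsafe ⟨hin, hmz, hmk⟩
              have := hInv.2.2 x y hin.1 hin.2.1 hin.2.2.1 hin.2.2.2
              by_cases hm0 : pvCell mark0 y x = 0
              · by_cases hc : PySem.Set.contains seen (x, y) = true
                · exact Or.inl hc
                · exact absurd (this.mpr ⟨hm0, by simpa using hc⟩) hmk
              · exact Or.inr (Or.inr hm0)
          rw [if_pos hskip]
          exact runB_stab maze W H mark0 g fB' rest seen (by omega) (by omega)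
        · rw [if_pos hin]
          exact runB_stab maze W H mark0 g fB' rest seen (by omega) (by omega)

-- ===== VERDICT (by name: the statement is the Claim_ definition above) =====
theorem dfs_spec : Claim_equal_dfs := by
  intro maze x y sol mark _ hPre
  obtain ⟨hne, hmzW, hsolL, hsolW, hmkL, hmkW⟩ := hPre
  have hlen : maze.length ≠ 0 := fun h => hne (List.length_eq_zero_iff.mp h)
  have hInv0 : pvInv (maze.getD 0 []).length maze.length mark mark PySem.Set.empty := by
    refine ⟨rfl, fun i => rfl, ?_⟩
    intro x' y' _ _ _ _
    simp [PySem.Set.empty]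
  have h1 : pvU (maze.getD 0 []).length maze.length mark PySem.Set.empty ≤
      maze.length * (maze.getD 0 []).length := by
    rw [Nat.mul_comm]
    exact pvU_le _ _ _ _
  have hsim := sim maze (maze.getD 0 []).length maze.length mark rfl rfl hmkL hmkW
    (maze.length * (maze.getD 0 []).length + 1) x y sol mark PySem.Set.empty [] hInv0
    (by omega)
  have hAlt : dfs_alt maze x y sol mark =
      runB maze ((maze.getD 0 []).length : Int) (maze.length : Int) mark
        (4 * maze.length * (maze.getD 0 []).length + 2) [(x, y)] PySem.Set.empty := by
    unfold dfs_alt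
    simp only [if_pos hlen]
  unfold Spec_dfs dfs
  rcases hb : (auxA (maze.length * (maze.getD 0 []).length + 1) maze x y sol mark).1 with _ | _
  · obtain ⟨seen', _, _, heq⟩ := hsim.2 hb
    rw [hAlt, heq (4 * maze.length * (maze.getD 0 []).length + 2)
      (4 * pvU (maze.getD 0 []).length maze.length mark seen' + 1)
      (by rw [Nat.mul_assoc]; simp only [List.length_nil]; omega)
      (by simp only [List.length_nil]; omega)]
    rw [runB_nil]
  · rw [hAlt, hsim.1 hb (4 * maze.length * (maze.getD 0 []).length + 2)
      (by rw [Nat.mul_assoc]; simp only [List.length_nil]; omega)]
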